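-- pv_equiv track=rewrite | github.com/AnViStark/Python_Software_Engineering | Py6/sam6_4.py | employee
-- ===== SOURCE A (Python) =====
-- def employee(tpl, number):
--     new_tuple = list(tpl)
--     if number in new_tuple:
--         if new_tuple.count(number) == 1:
--             new_tuple.index(number)
--             new_tuple = tuple(new_tuple[new_tuple.index(number):])
--             return new_tuple
--         else:
--             for i in range(new_tuple.index(number) + 1, len(new_tuple)):
--                 if new_tuple[i] == number:
--                     new_tuple = tuple(new_tuple[new_tuple.index(number):i + 1])
--                     break
--             return new_tuple
--     else:
--         new_tuple = ()
--         return new_tuple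
-- ===== SOURCE B (Python) =====
-- def employee(tpl, number):
--     it = iter(tpl)
--     for x in it:
--         if x == number:
--             out = [x]
--             for y in it:
--                 out.append(y)
--                 if y == number:
--                     break
--             return tuple(out)
--     return ()
-- ===== Notes on version B (the rewrite author's own statement) =====
-- stated objective: alternative
-- what changed: B consumes a single shared iterator: an outer loop discards elements until the first match, then an inner loop copies elements into an output list until (and including) the next match, with no index arithmetic, counting or slicing at all, whereas A computes indices via in/count/index scans and slices the list.
import Mathlib
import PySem

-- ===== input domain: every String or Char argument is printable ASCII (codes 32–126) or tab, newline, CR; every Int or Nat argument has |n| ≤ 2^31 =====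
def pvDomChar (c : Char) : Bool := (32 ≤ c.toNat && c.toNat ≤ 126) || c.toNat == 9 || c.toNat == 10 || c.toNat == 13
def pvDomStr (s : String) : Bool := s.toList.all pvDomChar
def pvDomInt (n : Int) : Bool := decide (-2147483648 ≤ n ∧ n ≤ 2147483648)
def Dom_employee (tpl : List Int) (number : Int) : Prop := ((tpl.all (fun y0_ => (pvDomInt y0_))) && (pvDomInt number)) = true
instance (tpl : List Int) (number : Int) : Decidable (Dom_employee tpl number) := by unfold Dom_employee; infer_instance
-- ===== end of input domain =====

-- B walks one shared iterator: skip until the first match, then copy elements (inclusive) until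
-- the next match — no counting, index arithmetic or slicing (objective: alternative).

-- ===== PORT A =====
-- the 'for i in range(index+1, len)' loop with break: Option accumulator, some = broken out
def employee (tpl : List Int) (number : Int) : List Int :=
  let new_tuple := tpl
  if number ∈ new_tuple then
    if PySem.List.count new_tuple number == 1 then
      match PySem.List.index? new_tuple number with
      | some j => PySem.List.slice new_tuple (some (j : Int)) none
      | none => []            -- unreachable: number ∈ new_tuple
    else
      match PySem.List.index? new_tuple number with
      | some j =>
        match (PySem.List.pyRange ((j : Int) + 1) (new_tuple.length : Int) 1).foldl
            (fun acc i =>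
              match acc with
              | some t => some t
              | none =>
                if PySem.List.pyGetD new_tuple i 0 == number then
                  some (PySem.List.slice new_tuple (some (j : Int)) (some (i + 1)))
                else none) none with
        | some t => t
        | none => new_tuple   -- loop finished without break
      | none => []            -- unreachable: number ∈ new_tuple
  else []

-- ===== PORT B =====
-- the inner 'for y in it: out.append(y); if y == number: break' loop (out is the accumulator, reversed)
def employeeTake (l : List Int) (number : Int) (out : List Int) : List Int :=
  match l with
  | [] => out.reverse
  | y :: rest =>
    if y = number then ((y :: out).reverse)
    else employeeTake rest number (y :: out)

-- the outer 'for x in it: if x == number: …' loop; falling through returns ()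
def employee_alt (tpl : List Int) (number : Int) : List Int :=
  match tpl with
  | [] => []
  | x :: rest =>
    if x = number then employeeTake rest number [x]
    else employee_alt rest number

-- ===== PRECONDITION & SPEC =====
def Spec_employee (tpl : List Int) (number : Int) (out : List Int) : Prop := out = employee_alt tpl number
instance (tpl : List Int) (number : Int) (out : List Int) : Decidable (Spec_employee tpl number out) := by unfold Spec_employee; infer_instance

-- ===== CLAIM (what is proved, stated in full; the proofs are below) =====
def Claim_equal_employee : Prop := ∀ (tpl : List Int) (number : Int), Dom_employee tpl number → Spec_employee tpl number (employee tpl number)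

-- ===== LEMMAS AND PROOFS =====

-- the positions list, used to analyse A's counting/indexing
def posFrom (l : List Int) (v : Int) (s : Int) : List Int :=
  ((PySem.List.enumerate l s).filter (fun p => p.2 == v)).map (fun p => p.1)

theorem posFrom_nil (v s : Int) : posFrom [] v s = [] := rfl

theorem posFrom_cons (x : Int) (l : List Int) (v s : Int) :
    posFrom (x :: l) v s = if x = v then s :: posFrom l v (s + 1) else posFrom l v (s + 1) := by
  by_cases h : x = v
  · subst h
    simp [posFrom, PySem.List.enumerate_cons]
  · simp [posFrom, PySem.List.enumerate_cons, h]

theorem mem_posFrom (l : List Int) (v s i : Int) :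
    i ∈ posFrom l v s ↔ ∃ k : Nat, k < l.length ∧ l[k]? = some v ∧ i = s + k := by
  induction l generalizing s with
  | nil => simp [posFrom_nil]
  | cons x l ih =>
    rw [posFrom_cons]
    by_cases hx : x = v
    · rw [if_pos hx]
      simp only [List.mem_cons, ih]
      constructor
      · rintro (rfl | ⟨k, hk, hget, rfl⟩)
        · exact ⟨0, by simp, by simp [hx], by simp⟩
        · exact ⟨k + 1, by simpa using hk, by simpa using hget, by push_cast; ring⟩
      · rintro ⟨k, hk, hget, hi⟩
        cases k with
        | zero => left; simpa using hi
        | succ k =>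
          right
          exact ⟨k, by simpa using hk, by simpa using hget, by push_cast at hi ⊢; omega⟩
    · rw [if_neg hx, ih]
      constructor
      · rintro ⟨k, hk, hget, rfl⟩
        exact ⟨k + 1, by simpa using hk, by simpa using hget, by push_cast; ring⟩
      · rintro ⟨k, hk, hget, hi⟩
        cases k with
        | zero =>
          simp at hget
          exact absurd hget hx
        | succ k =>
          exact ⟨k, by simpa using hk, by simpa using hget, by push_cast at hi ⊢; omega⟩

theorem posFrom_ge (l : List Int) (v s i : Int) (h : i ∈ posFrom l v s) : s ≤ i := by
  obtain ⟨k, _, _, rfl⟩ := (mem_posFrom l v s i).1 h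
  omega

-- splitting at the first occurrence
theorem posFrom_split (pre suf : List Int) (v s : Int) (hv : v ∉ pre) :
    posFrom (pre ++ v :: suf) v s = (s + pre.length) :: posFrom suf v (s + pre.length + 1) := by
  induction pre generalizing s with
  | nil => simp [posFrom_cons]
  | cons x pre ih =>
    have hx : ¬ x = v := by intro hx; exact hv (by simp [hx])
    rw [List.cons_append, posFrom_cons, if_neg hx,
      ih _ (fun hm => hv (List.mem_cons_of_mem _ hm))]
    simp only [List.length_cons]
    push_cast
    rw [show s + 1 + (pre.length : Int) = s + ((pre.length : Int) + 1) by ring]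

-- the break-loop of A: first index in [a,b) satisfying pred wins
theorem foldl_break_first (tpl : List Int) (number j : Int) (a b m : Int)
    (ham : a ≤ m) (hmb : m < b)
    (hm : (PySem.List.pyGetD tpl m 0 == number) = true)
    (hmin : ∀ i, a ≤ i → i < m → (PySem.List.pyGetD tpl i 0 == number) = false) :
    (PySem.List.pyRange a b 1).foldl
      (fun acc i =>
        match acc with
        | some t => some t
        | none =>
          if PySem.List.pyGetD tpl i 0 == number then
            some (PySem.List.slice tpl (some j) (some (i + 1)))
          else none) none
    = some (PySem.List.slice tpl (some j) (some (m + 1))) := by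
  have hstay : ∀ (l : List Int) (t : List Int),
      l.foldl (fun acc i =>
        match acc with
        | some t => some t
        | none =>
          if PySem.List.pyGetD tpl i 0 == number then
            some (PySem.List.slice tpl (some j) (some (i + 1)))
          else none) (some t) = some t := by
    intro l t; induction l with
    | nil => rfl
    | cons x l ih => simpa using ih
  rw [PySem.List.pyRange_one_append a m b ham (by omega), List.foldl_append]
  have hnone : ∀ (l : List Int), (∀ i ∈ l, (PySem.List.pyGetD tpl i 0 == number) = false) →
      l.foldl
        (fun acc i =>
          match acc with
          | some t => some t
          | none =>
            if PySem.List.pyGetD tpl i 0 == number then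
              some (PySem.List.slice tpl (some j) (some (i + 1)))
            else none) none = none := by
    intro l hl
    induction l with
    | nil => rfl
    | cons x l ih =>
      have hx := hl x (by simp)
      simp only [List.foldl_cons, hx]
      exact ih (fun i hi => hl i (List.mem_cons_of_mem _ hi))
  have hfalse : ∀ i ∈ PySem.List.pyRange a m 1, (PySem.List.pyGetD tpl i 0 == number) = false := by
    intro i hi
    rw [PySem.List.mem_pyRange_one] at hi
    exact hmin i hi.1 hi.2
  rw [hnone _ hfalse, PySem.List.pyRange_one_cons hmb]
  simp only [List.foldl_cons, hm]
  exact hstay _ _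

-- B's inner loop when no further occurrence exists: copies the whole rest
theorem employeeTake_no_occ (l : List Int) (v : Int) (out : List Int) (h : v ∉ l) :
    employeeTake l v out = out.reverse ++ l := by
  induction l generalizing out with
  | nil => simp [employeeTake]
  | cons y l ih =>
    have hy : ¬ y = v := by intro hy; exact h (by simp [hy])
    simp only [employeeTake, if_neg hy]
    rw [ih _ (fun hm => h (List.mem_cons_of_mem _ hm))]
    simp

-- B's inner loop when an occurrence exists: copies up to and including it
theorem employeeTake_occ (pre2 suf2 : List Int) (v : Int) (out : List Int) (h : v ∉ pre2) :
    employeeTake (pre2 ++ v :: suf2) v out = out.reverse ++ pre2 ++ [v] := by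
  induction pre2 generalizing out with
  | nil => simp [employeeTake]
  | cons y pre2 ih =>
    have hy : ¬ y = v := by intro hy; exact h (by simp [hy])
    simp only [List.cons_append, employeeTake, if_neg hy]
    rw [ih _ (fun hm => h (List.mem_cons_of_mem _ hm))]
    simp

-- B's outer loop: skipping the non-matching prefix
theorem employee_alt_no_occ (l : List Int) (v : Int) (h : v ∉ l) :
    employee_alt l v = [] := by
  induction l with
  | nil => rfl
  | cons x l ih =>
    have hx : ¬ x = v := by intro hx; exact h (by simp [hx])
    simp only [employee_alt, if_neg hx]
    exact ih (fun hm => h (List.mem_cons_of_mem _ hm))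

theorem employee_alt_split (pre suf : List Int) (v : Int) (h : v ∉ pre) :
    employee_alt (pre ++ v :: suf) v = employeeTake suf v [v] := by
  induction pre with
  | nil => simp [employee_alt]
  | cons x pre ih =>
    have hx : ¬ x = v := by intro hx; exact h (by simp [hx])
    simp only [List.cons_append, employee_alt, if_neg hx]
    exact ih (fun hm => h (List.mem_cons_of_mem _ hm))

-- ===== VERDICT (by name: the statement is the Claim_ definition above) =====
theorem employee_spec : Claim_equal_employee := by
  intro tpl number _
  unfold Spec_employee
  unfold employee
  by_cases hmem : number ∈ tpl
  · rw [if_pos hmem]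
    have hsome : (PySem.List.index? tpl number).isSome := by
      rw [PySem.List.index?_isSome_iff]; exact hmem
    obtain ⟨j, hj⟩ := Option.isSome_iff_exists.1 hsome
    obtain ⟨pre, suf, htpl, hlen, hpre⟩ := (PySem.List.index?_eq_some_iff tpl number j).1 hj
    subst htpl
    subst hlen
    rw [employee_alt_split pre suf number hpre]
    by_cases hc : PySem.List.count (pre ++ number :: suf) number = 1
    · -- single occurrence: number ∉ suf
      rw [if_pos (by simpa using hc), hj]
      have hns : number ∉ suf := by
        intro hm
        rw [PySem.List.count_eq] at hc
        have : 1 ≤ suf.count number := List.one_le_count_iff.2 hm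
        simp at hc
        omega
      rw [employeeTake_no_occ suf number [number] hns]
      show PySem.List.slice (pre ++ number :: suf) (some (pre.length : Int)) none
          = [number].reverse ++ suf
      rw [PySem.List.slice_from_natCast, List.drop_left]
      simp
    · -- at least two occurrences: number ∈ suf
      rw [if_neg (by simpa using hc), hj]
      have hmemsuf : number ∈ suf := by
        by_contra hns
        apply hc
        rw [PySem.List.count_eq]
        simp [List.count_eq_zero_of_not_mem hns,
          List.count_eq_zero_of_not_mem hpre]
      obtain ⟨k2, hk2⟩ := Option.isSome_iff_exists.1
        ((PySem.List.index?_isSome_iff suf number).2 hmemsuf)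
      obtain ⟨pre2, suf2, hsuf, hlen2, hpre2⟩ := (PySem.List.index?_eq_some_iff suf number k2).1 hk2
      subst hsuf
      rw [employeeTake_occ pre2 suf2 number [number] hpre2]
      have hsplit := posFrom_split pre (pre2 ++ number :: suf2) number 0 hpre
      rw [posFrom_split pre2 suf2 number _ hpre2] at hsplit
      set m : Int := 0 + (pre.length : Int) + 1 + (pre2.length : Int) with hm_def
      have hlentpl : ((pre ++ number :: (pre2 ++ number :: suf2)).length : Int)
          = (pre.length : Int) + 1 + (pre2.length : Int) + 1 + (suf2.length : Int) := by
        simp; ring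
      have hmlt : m < ((pre ++ number :: (pre2 ++ number :: suf2)).length : Int) := by
        rw [hlentpl]; omega
      have hm0 : 0 ≤ m := by positivity
      have hmmem : m ∈ posFrom (pre ++ number :: (pre2 ++ number :: suf2)) number 0 := by
        rw [hsplit]; exact List.mem_cons_of_mem _ (List.mem_cons_self)
      obtain ⟨k, hk, hgetk, hmk⟩ := (mem_posFrom _ _ _ _).1 hmmem
      have hmtoNat : m.toNat = k := by omega
      have hgetm : PySem.List.pyGetD (pre ++ number :: (pre2 ++ number :: suf2)) m 0 = number := by
        rw [PySem.List.pyGetD_eq_getElem _ 0 hm0 hmlt]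
        rw [List.getElem_eq_iff (by omega)]
        rw [hmtoNat]; exact hgetk
      have hbreak := foldl_break_first (pre ++ number :: (pre2 ++ number :: suf2)) number
        ((pre.length : Nat) : Int) (((pre.length : Nat) : Int) + 1) ((pre ++ number :: (pre2 ++ number :: suf2)).length : Int) m
        (by omega) hmlt (by simp [hgetm])
        (by
          intro i h1 h2
          rw [beq_eq_false_iff_ne]
          intro hbad
          have hi0 : 0 ≤ i := by omega
          have hilt : i < ((pre ++ number :: (pre2 ++ number :: suf2)).length : Int) := by omega
          rw [PySem.List.pyGetD_eq_getElem _ 0 hi0 hilt] at hbad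
          have himem : i ∈ posFrom (pre ++ number :: (pre2 ++ number :: suf2)) number 0 := by
            rw [mem_posFrom]
            refine ⟨i.toNat, by omega, ?_, by omega⟩
            rw [List.getElem?_eq_getElem (by omega)]
            exact congrArg some hbad
          rw [hsplit] at himem
          simp only [List.mem_cons] at himem
          rcases himem with h | h | h
          · omega
          · omega
          · have := posFrom_ge _ _ _ _ h
            omega)
      have hbreak' :
          (PySem.List.pyRange (((pre.length : Nat) : Int) + 1)
              (((pre ++ number :: (pre2 ++ number :: suf2)).length : Nat) : Int) 1).foldl
            (fun acc i =>
              match acc with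
              | some t => some t
              | none =>
                if PySem.List.pyGetD (pre ++ number :: (pre2 ++ number :: suf2)) i 0 == number then
                  some (PySem.List.slice (pre ++ number :: (pre2 ++ number :: suf2))
                    (some ((pre.length : Nat) : Int)) (some (i + 1)))
                else none) none
          = some (PySem.List.slice (pre ++ number :: (pre2 ++ number :: suf2))
              (some ((pre.length : Nat) : Int)) (some (m + 1))) := hbreak
      simp only [hbreak']
      have hmval : m + 1 = ((pre.length : Nat) : Int) + ((pre2.length + 2 : Nat) : Int) := by
        rw [hm_def]; push_cast; ring
      rw [hmval, PySem.List.slice_natCast_add, List.drop_left]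
      simp [List.take_succ_cons, List.take_append]
  · rw [if_neg hmem]
    rw [employee_alt_no_occ tpl number hmem]
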